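-- pv_equiv track=rewrite | github.com/SunLab-UGA/no-fec-infocom-private | prebuild_python/interleave2.py | create_bit_position_dict
-- ===== SOURCE A (Python) =====
-- def create_bit_position_dict(num_floats=3):
--     bit_dict = {}
--     float_labels = ["sign", "exponent", "significand"]
--     float_components = [1, 8, 23]  # Number of bits in each component
--
--     bit_position = 0
--     for float_idx in range(1, num_floats+1):  # floats per symbol
--         for component_idx, component_size in enumerate(float_components):
--             label = float_labels[component_idx]
--             for bit in range(1, component_size + 1):
--                 key = bit_position
--                 value = f"{label}-{bit}-{float_idx}"
--                 bit_dict[key] = value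
--                 bit_position += 1
--
--     return bit_dict
-- ===== SOURCE B (Python) =====
-- def create_bit_position_dict(num_floats=3):
--     # Build a 32-entry template of per-float component labels once,
--     # then compute each key arithmetically: 32 bits per float.
--     template = []
--     for label, size in [("sign", 1), ("exponent", 8), ("significand", 23)]:
--         for b in range(1, size + 1):
--             template.append(f"{label}-{b}")
--     bit_dict = {}
--     for float_idx in range(1, num_floats + 1):
--         base = (float_idx - 1) * 32
--         for off, lab in enumerate(template):
--             bit_dict[base + off] = f"{lab}-{float_idx}"
--     return bit_dict
-- ===== Notes on version B (the rewrite author's own statement) =====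
-- stated objective: simpler
-- what changed: Replaces the triple-nested loop threading a running bit_position counter with a precomputed per-float label template (one entry per bit of a float) and keys computed arithmetically as base+offset in a single pass over the floats.
import Mathlib
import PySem

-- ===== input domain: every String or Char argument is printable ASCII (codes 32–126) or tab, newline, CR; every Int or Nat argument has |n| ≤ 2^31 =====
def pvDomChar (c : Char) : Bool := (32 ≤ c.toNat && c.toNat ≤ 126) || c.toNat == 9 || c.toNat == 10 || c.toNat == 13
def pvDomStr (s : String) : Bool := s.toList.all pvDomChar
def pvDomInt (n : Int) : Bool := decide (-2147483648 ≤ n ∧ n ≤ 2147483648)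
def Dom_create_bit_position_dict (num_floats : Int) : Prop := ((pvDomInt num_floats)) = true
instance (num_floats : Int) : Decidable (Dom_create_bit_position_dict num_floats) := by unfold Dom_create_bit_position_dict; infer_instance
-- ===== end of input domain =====

-- B builds the 32-label per-float template once and computes keys arithmetically
-- ((float_idx-1)*32 + offset) instead of threading a running bit_position counter
-- through three nested loops (objective: simpler decomposition; same cost).

-- ===== PORT A =====
def create_bit_position_dict (num_floats : Int) : List (Int × String) :=
  let float_labels : List String := ["sign", "exponent", "significand"]
  let float_components : List Int := [1, 8, 23]
  let st :=
    (PySem.List.pyRange 1 (num_floats + 1) 1).foldl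
      (fun (st : PySem.Dict Int String × Int) float_idx =>
        (PySem.List.enumerate float_components 0).foldl
          (fun st p =>
            let label := PySem.List.pyGetD float_labels p.1 ""
            (PySem.List.pyRange 1 (p.2 + 1) 1).foldl
              (fun (st : PySem.Dict Int String × Int) bit =>
                (st.1.insert st.2
                  (label ++ "-" ++ PySem.Int.toStr bit ++ "-" ++ PySem.Int.toStr float_idx),
                 st.2 + 1))
              st)
          st)
      (PySem.Dict.empty, 0)
  st.1.items

-- ===== PORT B =====
def pvTemplate : List String :=
  [("sign", (1 : Int)), ("exponent", 8), ("significand", 23)].foldl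
    (fun acc p =>
      (PySem.List.pyRange 1 (p.2 + 1) 1).foldl
        (fun acc b => acc ++ [p.1 ++ "-" ++ PySem.Int.toStr b]) acc)
    []

def create_bit_position_dict_alt (num_floats : Int) : List (Int × String) :=
  ((PySem.List.pyRange 1 (num_floats + 1) 1).foldl
    (fun (bit_dict : PySem.Dict Int String) float_idx =>
      let base := (float_idx - 1) * 32
      (PySem.List.enumerate pvTemplate 0).foldl
        (fun bit_dict q =>
          bit_dict.insert (base + q.1) (q.2 ++ "-" ++ PySem.Int.toStr float_idx))
        bit_dict)
    PySem.Dict.empty).items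

-- ===== PRECONDITION & SPEC =====
def Spec_create_bit_position_dict (num_floats : Int) (out : List (Int × String)) : Prop := out = create_bit_position_dict_alt num_floats
instance (num_floats : Int) (out : List (Int × String)) : Decidable (Spec_create_bit_position_dict num_floats out) := by unfold Spec_create_bit_position_dict; infer_instance

-- ===== CLAIM (what is proved, stated in full; the proofs are below) =====
def Claim_equal_create_bit_position_dict : Prop := ∀ (num_floats : Int), Dom_create_bit_position_dict num_floats → Spec_create_bit_position_dict num_floats (create_bit_position_dict num_floats)

-- ===== LEMMAS AND PROOFS =====

-- the per-float step of A's fold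
def pvStepA (st : PySem.Dict Int String × Int) (float_idx : Int) : PySem.Dict Int String × Int :=
  (PySem.List.enumerate [(1 : Int), 8, 23] 0).foldl
    (fun st p =>
      let label := PySem.List.pyGetD ["sign", "exponent", "significand"] p.1 ""
      (PySem.List.pyRange 1 (p.2 + 1) 1).foldl
        (fun (st : PySem.Dict Int String × Int) bit =>
          (st.1.insert st.2
            (label ++ "-" ++ PySem.Int.toStr bit ++ "-" ++ PySem.Int.toStr float_idx),
           st.2 + 1))
        st)
    st

-- the per-float step of B's fold
def pvStepB (bit_dict : PySem.Dict Int String) (float_idx : Int) : PySem.Dict Int String :=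
  (PySem.List.enumerate pvTemplate 0).foldl
    (fun bit_dict q =>
      bit_dict.insert ((float_idx - 1) * 32 + q.1) (q.2 ++ "-" ++ PySem.Int.toStr float_idx))
    bit_dict

lemma pvStepA_eq (d : PySem.Dict Int String) (fi : Int) :
    pvStepA (d, (fi - 1) * 32) fi = (pvStepB d fi, (fi - 1) * 32 + 32) := by
  simp [pvStepA, pvStepB, pvTemplate, PySem.List.enumerate, PySem.List.pyRange,
    PySem.List.pyGetD, PySem.List.pyGet?, PySem.List.pyIdx?, List.range_succ,
    String.append_assoc]
  ring_nf
  exact ⟨trivial, trivial⟩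

lemma pv_fold_eq (m : ℕ) :
    (PySem.List.pyRange 1 ((m : Int) + 1) 1).foldl pvStepA (PySem.Dict.empty, 0) =
      ((PySem.List.pyRange 1 ((m : Int) + 1) 1).foldl pvStepB PySem.Dict.empty,
       (m : Int) * 32) := by
  induction m with
  | zero => simp [PySem.List.pyRange_one_eq_nil]
  | succ k ih =>
    have h : PySem.List.pyRange 1 ((k : Int) + 1 + 1) 1 =
        PySem.List.pyRange 1 ((k : Int) + 1) 1 ++ [(k : Int) + 1] := by
      simpa using PySem.List.pyRange_one_succ_right (a := 1) (b := (k : Int) + 1) (by omega)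
    push_cast
    rw [h, List.foldl_append, List.foldl_append, ih]
    simp only [List.foldl_cons, List.foldl_nil]
    have := pvStepA_eq ((PySem.List.pyRange 1 ((k : Int) + 1) 1).foldl pvStepB PySem.Dict.empty) ((k : Int) + 1)
    simp only [show ((k : Int) + 1 - 1) * 32 = (k : Int) * 32 by ring] at this
    rw [this, Prod.mk.injEq]
    exact ⟨rfl, by ring⟩

-- ===== VERDICT (by name: the statement is the Claim_ definition above) =====
theorem create_bit_position_dict_spec : Claim_equal_create_bit_position_dict := by
  intro n _
  unfold Spec_create_bit_position_dict create_bit_position_dict create_bit_position_dict_alt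
  show ((PySem.List.pyRange 1 (n + 1) 1).foldl pvStepA (PySem.Dict.empty, 0)).1.items = _
  show _ = ((PySem.List.pyRange 1 (n + 1) 1).foldl pvStepB PySem.Dict.empty).items
  by_cases hn : n ≤ 0
  · rw [PySem.List.pyRange_one_eq_nil (by omega)]
    simp
  · have : n = ((n.toNat : Int)) := by omega
    rw [this, pv_fold_eq n.toNat]
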